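-- pv_equiv track=rewrite | github.com/pypi-data/pypi-mirror-332 | packages/strings-to-positions/strings_to_positions-1.1.1.tar.gz/strings_to_positions-1.1.1/src/strings_to_positions/positions.py | offset_to_position
-- ===== SOURCE A (Python) =====
-- from typing import List, Union, Optional, Dict, Tuple
--
-- def offset_to_position(
--     source: str, offset: Tuple[int, int]
-- ) -> Dict[str, Dict[str, int]]:
--     """
--     Given a source text and an offset tuple (start, end), return a dict with line (1-indexed),
--     column (1-indexed), and the offset for both start and end positions.
--     """
--     lines = source.splitlines(keepends=True)
--
--     def get_position(offset: int) -> Dict[str, int]: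
--         current_offset = 0
--         for i, line in enumerate(lines, start=1):
--             if current_offset + len(line) > offset:
--                 column = offset - current_offset + 1  # 1-indexed column
--                 return {"line": i, "column": column, "offset": offset}
--             current_offset += len(line)
--         # If offset is beyond source length, return the last position.
--         return {
--             "line": len(lines),
--             "column": len(lines[-1]) if lines else 1,
--             "offset": offset,
--         }
--
--     start_position = get_position(offset[0])
--     end_position = get_position(offset[1])
--
--     return {"start": start_position, "end": end_position}
-- ===== SOURCE B (Python) =====
-- def offset_to_position(source, offset):
--     """
--     Same result as A, but computed from a prefix array of cumulative line-end
--     offsets with a hand-rolled binary search per offset, instead of A's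
--     per-offset linear scan over the lines.
--     """
--     lines = source.splitlines(keepends=True)
--     ends = []
--     total = 0
--     for line in lines:
--         total += len(line)
--         ends.append(total)
--     n = len(lines)
--
--     def get_position(off):
--         lo, hi = 0, n
--         while lo < hi:
--             mid = (lo + hi) // 2
--             if off < ends[mid]:
--                 hi = mid
--             else:
--                 lo = mid + 1
--         if lo < n:
--             return {"line": lo + 1, "column": off - (ends[lo] - len(lines[lo])) + 1, "offset": off}
--         return {"line": n, "column": len(lines[-1]) if lines else 1, "offset": off}
--
--     return {"start": get_position(offset[0]), "end": get_position(offset[1])}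
-- ===== Notes on version B (the rewrite author's own statement) =====
-- stated objective: alternative
-- what changed: B precomputes a prefix array of cumulative line-end offsets once and locates each offset's line with a hand-rolled binary search, replacing A's per-offset linear scan with a running accumulator.
import Mathlib
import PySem

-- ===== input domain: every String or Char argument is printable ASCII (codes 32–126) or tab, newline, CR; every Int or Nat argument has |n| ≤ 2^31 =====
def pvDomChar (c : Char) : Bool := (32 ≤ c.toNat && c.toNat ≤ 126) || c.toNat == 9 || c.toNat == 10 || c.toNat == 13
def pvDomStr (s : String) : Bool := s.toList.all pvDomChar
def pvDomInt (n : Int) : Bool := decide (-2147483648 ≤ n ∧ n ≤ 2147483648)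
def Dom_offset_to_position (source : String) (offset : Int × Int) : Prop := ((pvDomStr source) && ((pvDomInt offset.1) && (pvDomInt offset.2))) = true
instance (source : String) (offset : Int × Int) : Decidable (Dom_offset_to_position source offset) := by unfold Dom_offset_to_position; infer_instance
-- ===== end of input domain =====

-- B keeps A's return value but replaces the per-offset linear scan by a prefix
-- array of cumulative line-end offsets plus a binary search (alternative structure).

-- ===== PORT A =====
-- shared helper: source.splitlines(keepends=True); exact for the separators
-- '\n', '\r', '\r\n' (the only line breaks admitted by Dom_offset_to_position)
def pvSplitKeep (cur : List Char) : List Char → List (List Char)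
  | [] => if cur.isEmpty then [] else [cur.reverse]
  | '\n' :: rest => (cur.reverse ++ ['\n']) :: pvSplitKeep [] rest
  | '\r' :: '\n' :: rest => (cur.reverse ++ ['\r', '\n']) :: pvSplitKeep [] rest
  | '\r' :: rest => (cur.reverse ++ ['\r']) :: pvSplitKeep [] rest
  | c :: rest => pvSplitKeep (c :: cur) rest

-- the for-loop of A's get_position: returns some result, or none when the loop falls through
def aLoop (ls : List (List Char)) (i : Int) (cur : Int) (off : Int) : Option (List (String × Int)) :=
  match ls with
  | [] => none
  | l :: rest =>
    if off < cur + (l.length : Int) then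
      some [("line", i), ("column", off - cur + 1), ("offset", off)]
    else aLoop rest (i + 1) (cur + (l.length : Int)) off

def offset_to_position (source : String) (offset : Int × Int) : List (String × List (String × Int)) :=
  let lines := pvSplitKeep [] source.toList
  let getPos := fun (off : Int) =>
    match aLoop lines 1 0 off with
    | some r => r
    | none =>
      [("line", (lines.length : Int)),
       ("column", match lines.getLast? with | some l => ((l.length : Nat) : Int) | none => 1),
       ("offset", off)]
  [("start", getPos offset.1), ("end", getPos offset.2)]

-- ===== PORT B =====
-- the ends-building loop of Source B: cumulative offsets of line ends
def bEnds (ls : List (List Char)) (total : Int) : List Int :=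
  match ls with
  | [] => []
  | l :: rest => (total + (l.length : Int)) :: bEnds rest (total + (l.length : Int))

-- Source B's while-loop: first index in [lo, hi) whose end exceeds off (by bisection)
def bSearch (ends : List Int) (off : Int) (lo hi : Nat) : Nat :=
  if h : lo < hi then
    if off < ends.getD ((lo + hi) / 2) 0 then bSearch ends off lo ((lo + hi) / 2)
    else bSearch ends off ((lo + hi) / 2 + 1) hi
  else lo
termination_by hi - lo
decreasing_by all_goals omega

def offset_to_position_alt (source : String) (offset : Int × Int) : List (String × List (String × Int)) :=
  let lines := pvSplitKeep [] source.toList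
  let ends := bEnds lines 0
  let n := lines.length
  let getPos := fun (off : Int) =>
    let j := bSearch ends off 0 n
    if j < n then
      [("line", ((j : Int) + 1)),
       ("column", off - (ends.getD j 0 - (((lines.getD j []).length : Nat) : Int)) + 1),
       ("offset", off)]
    else
      [("line", (n : Int)),
       ("column", match lines.getLast? with | some l => ((l.length : Nat) : Int) | none => 1),
       ("offset", off)]
  [("start", getPos offset.1), ("end", getPos offset.2)]

-- ===== PRECONDITION & SPEC =====
def Spec_offset_to_position (source : String) (offset : Int × Int) (out : List (String × List (String × Int))) : Prop := out = offset_to_position_alt source offset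
instance (source : String) (offset : Int × Int) (out : List (String × List (String × Int))) : Decidable (Spec_offset_to_position source offset out) := by unfold Spec_offset_to_position; infer_instance

-- ===== CLAIM (what is proved, stated in full; the proofs are below) =====
def Claim_equal_offset_to_position : Prop := ∀ (source : String) (offset : Int × Int), Dom_offset_to_position source offset → Spec_offset_to_position source offset (offset_to_position source offset)

-- ===== LEMMAS AND PROOFS =====

theorem bEnds_cons (l : List Char) (rest : List (List Char)) (t : Int) :
    bEnds (l :: rest) t = (t + (l.length : Int)) :: bEnds rest (t + (l.length : Int)) := rfl

theorem bEnds_length (ls : List (List Char)) (t : Int) : (bEnds ls t).length = ls.length := by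
  induction ls generalizing t with
  | nil => rfl
  | cons l rest ih => simp [bEnds, ih]

theorem bEnds_ge (ls : List (List Char)) (t : Int) (j : Nat) (hj : j < ls.length) :
    t ≤ (bEnds ls t).getD j 0 := by
  induction ls generalizing t j with
  | nil => simp at hj
  | cons l rest ih =>
    cases j with
    | zero => rw [bEnds_cons, List.getD_cons_zero]; omega
    | succ j' =>
      rw [bEnds_cons, List.getD_cons_succ]
      have := ih (t + (l.length : Int)) j' (by simpa using hj)
      omega

theorem bEnds_mono (ls : List (List Char)) (t : Int) (j k : Nat) (hjk : j ≤ k) (hk : k < ls.length) :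
    (bEnds ls t).getD j 0 ≤ (bEnds ls t).getD k 0 := by
  induction ls generalizing t j k with
  | nil => simp at hk
  | cons l rest ih =>
    cases j with
    | zero =>
      cases k with
      | zero => exact le_refl _
      | succ k' =>
        rw [bEnds_cons, List.getD_cons_zero, List.getD_cons_succ]
        have := bEnds_ge rest (t + (l.length : Int)) k' (by simpa using hk)
        omega
    | succ j' =>
      cases k with
      | zero => omega
      | succ k' =>
        rw [bEnds_cons, List.getD_cons_succ, List.getD_cons_succ]
        exact ih (t + (l.length : Int)) j' k' (by omega) (by simpa using hk)

theorem bSearch_spec (es : List Int) (off : Int)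
    (mono : ∀ j k, j ≤ k → k < es.length → es.getD j 0 ≤ es.getD k 0)
    (lo hi : Nat) (hhi : hi ≤ es.length) (hlo : lo ≤ hi)
    (H1 : ∀ j < lo, es.getD j 0 ≤ off)
    (H2 : ∀ j, hi ≤ j → j < es.length → off < es.getD j 0) :
    (∀ j < bSearch es off lo hi, es.getD j 0 ≤ off) ∧
    (bSearch es off lo hi < es.length → off < es.getD (bSearch es off lo hi) 0) ∧
    bSearch es off lo hi ≤ es.length := by
  rw [bSearch]
  split
  · split
    · rename_i h hlt
      exact bSearch_spec es off mono lo ((lo + hi) / 2) (by omega) (by omega) H1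
        (fun j hj hjn => lt_of_lt_of_le hlt (mono _ j (by omega) hjn))
    · rename_i h hge
      exact bSearch_spec es off mono ((lo + hi) / 2 + 1) hi hhi (by omega)
        (fun j hj => le_trans (mono j ((lo + hi) / 2) (by omega) (by omega)) (by omega)) H2
  · rename_i h
    exact ⟨H1, fun hlt => H2 lo (by omega) hlt, by omega⟩
termination_by hi - lo
decreasing_by all_goals omega

theorem aLoop_char (ls : List (List Char)) (off : Int) (i cur : Int) (r : Nat)
    (h1 : r ≤ ls.length)
    (h2 : ∀ j < r, (bEnds ls cur).getD j 0 ≤ off)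
    (h3 : r < ls.length → off < (bEnds ls cur).getD r 0) :
    aLoop ls i cur off =
      if r < ls.length then
        some [("line", i + (r : Int)),
              ("column", off - ((bEnds ls cur).getD r 0 - (((ls.getD r []).length : Nat) : Int)) + 1),
              ("offset", off)]
      else none := by
  induction ls generalizing i cur r with
  | nil =>
    have : r = 0 := by simpa using h1
    subst this
    simp [aLoop]
  | cons l rest ih =>
    by_cases hc : off < cur + (l.length : Int)
    · have hr : r = 0 := by
        by_contra hne
        have h20 := h2 0 (by omega)
        rw [bEnds_cons, List.getD_cons_zero] at h20
        omega
      subst hr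
      rw [if_pos (by simp)]
      rw [bEnds_cons, List.getD_cons_zero, List.getD_cons_zero]
      show (if off < cur + (l.length : Int) then _ else _) = _
      rw [if_pos hc]
      norm_num
    · have hr : 0 < r := by
        rcases Nat.eq_zero_or_pos r with h0 | h0
        · subst h0
          have := h3 (by simp)
          rw [bEnds_cons, List.getD_cons_zero] at this
          omega
        · exact h0
      obtain ⟨r', rfl⟩ : ∃ r', r = r' + 1 := ⟨r - 1, by omega⟩
      show (if off < cur + (l.length : Int) then _ else aLoop rest (i + 1) (cur + (l.length : Int)) off) = _
      rw [if_neg hc]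
      rw [ih (i + 1) (cur + (l.length : Int)) r' (by simpa using h1)
          (fun j hj => by
            have := h2 (j + 1) (by omega)
            rwa [bEnds_cons, List.getD_cons_succ] at this)
          (fun hlt => by
            have := h3 (by simpa using hlt)
            rwa [bEnds_cons, List.getD_cons_succ] at this)]
      rw [bEnds_cons, List.getD_cons_succ, List.getD_cons_succ]
      by_cases hlt : r' < rest.length
      · rw [if_pos hlt, if_pos (by simpa using hlt)]
        have : (i + 1) + (r' : Int) = i + ((r' + 1 : Nat) : Int) := by push_cast; ring
        rw [this]
      · rw [if_neg hlt, if_neg (by simpa using hlt)]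

theorem getPos_eq (lines : List (List Char)) (off : Int) :
    (match aLoop lines 1 0 off with
     | some r => r
     | none =>
       [("line", (lines.length : Int)),
        ("column", match lines.getLast? with | some l => ((l.length : Nat) : Int) | none => 1),
        ("offset", off)]) =
    (let ends := bEnds lines 0
     let n := lines.length
     let j := bSearch ends off 0 n
     if j < n then
       [("line", ((j : Int) + 1)),
        ("column", off - (ends.getD j 0 - (((lines.getD j []).length : Nat) : Int)) + 1),
        ("offset", off)]
     else
       [("line", (n : Int)),
        ("column", match lines.getLast? with | some l => ((l.length : Nat) : Int) | none => 1),
        ("offset", off)]) := by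
  have hlen := bEnds_length lines 0
  have mono : ∀ j k, j ≤ k → k < (bEnds lines 0).length →
      (bEnds lines 0).getD j 0 ≤ (bEnds lines 0).getD k 0 :=
    fun j k hjk hk => bEnds_mono lines 0 j k hjk (by omega)
  obtain ⟨P1, P2, P3⟩ := bSearch_spec (bEnds lines 0) off mono 0 lines.length
    (by omega) (Nat.zero_le _)
    (fun j hj => absurd hj (Nat.not_lt_zero j))
    (fun j hj hjn => absurd hjn (by omega))
  rw [aLoop_char lines off 1 0 (bSearch (bEnds lines 0) off 0 lines.length)
      (by omega) P1 (fun h => P2 (by omega))]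
  by_cases hlt : bSearch (bEnds lines 0) off 0 lines.length < lines.length
  · rw [if_pos hlt]
    simp only [if_pos hlt]
    rw [show (1 : Int) + (bSearch (bEnds lines 0) off 0 lines.length : Int)
        = (bSearch (bEnds lines 0) off 0 lines.length : Int) + 1 by ring]
  · rw [if_neg hlt]
    simp only [if_neg hlt]

-- ===== VERDICT (by name: the statement is the Claim_ definition above) =====
theorem offset_to_position_spec : Claim_equal_offset_to_position := by
  intro source offset _
  unfold Spec_offset_to_position offset_to_position offset_to_position_alt
  simp only []
  rw [getPos_eq, getPos_eq]
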